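-- pv_equiv track=rewrite | github.com/taehwakkwon/algorithm | 월간코드챌린지/1회차/333.py | solution
-- ===== SOURCE A (Python) =====
-- def solution(a):
--     n = len(a)
--     if n <= 2:
--         return n
--     cnt = 2
--     for i in range(1, n - 1):
--         tmp = 0
--         pre_a = float('inf')
--         pre_b = float('inf')
--
--         for j in range(i + 1):
--             if a[i] > a[j] or a[i] > pre_a:
--                 tmp += 1
--                 pre_a = min(a[j], pre_a)
--                 break
--         for j in range(i + 1, n):
--             if a[i] > a[j] or a[i] > pre_b:
--                 tmp += 1
--                 pre_b = min(a[j], pre_b)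
--                 break
--         if tmp < 2:
--             cnt += 1
--     return cnt
-- ===== SOURCE B (Python) =====
-- def solution(a):
--     n = len(a)
--     if n <= 2:
--         return n
--     pref = [a[0]]
--     for x in a[1:]:
--         pref.append(min(pref[-1], x))
--     suf_rev = [a[-1]]
--     for x in reversed(a[:-1]):
--         suf_rev.append(min(suf_rev[-1], x))
--     suf = suf_rev[::-1]
--     cnt = 2
--     for i in range(1, n - 1):
--         if a[i] <= pref[i - 1] or a[i] <= suf[i + 1]:
--             cnt += 1
--     return cnt
-- ===== Notes on version B (the rewrite author's own statement) =====
-- stated objective: faster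
-- what changed: Replaces the per-index linear scans to both sides with precomputed prefix-minimum and suffix-minimum arrays, making each index an O(1) check.
import Mathlib
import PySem

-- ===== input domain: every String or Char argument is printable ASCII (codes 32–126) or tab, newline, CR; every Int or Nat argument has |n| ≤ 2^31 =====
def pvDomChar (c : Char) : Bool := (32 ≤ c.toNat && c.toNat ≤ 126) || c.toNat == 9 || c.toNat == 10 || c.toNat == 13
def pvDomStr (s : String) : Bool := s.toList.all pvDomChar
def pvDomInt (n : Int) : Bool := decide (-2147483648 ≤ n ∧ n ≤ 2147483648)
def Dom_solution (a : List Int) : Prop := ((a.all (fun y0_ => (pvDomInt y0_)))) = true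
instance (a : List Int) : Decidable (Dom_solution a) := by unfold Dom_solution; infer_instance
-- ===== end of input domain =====

-- B replaces A's O(n^2) two-sided scans with prefix-/suffix-minimum arrays (O(n)); return values are identical.

-- ===== PORT A =====
-- inner 'for j in range(..): if a[i] > a[j] or a[i] > pre: tmp += 1; break' loop;
-- pre_a/pre_b is carried as an Option Int (none = float('inf')); its update before
-- the break is dead (the loop exits), so the port returns 0/1 directly
def pvScanBreak (a : List Int) (ai : Int) (pre : Option Int) : List Int → Int
  | [] => 0
  | j :: js =>
    if ai > PySem.List.pyGetD a j 0 then 1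
    else
      match pre with
      | some p => if ai > p then 1 else pvScanBreak a ai pre js
      | none => pvScanBreak a ai pre js

def solution (a : List Int) : Int :=
  let n : Int := a.length
  if n ≤ 2 then n
  else
    (PySem.List.pyRange 1 (n - 1) 1).foldl (fun cnt i =>
      let ai := PySem.List.pyGetD a i 0
      let tmp : Int := pvScanBreak a ai none (PySem.List.pyRange 0 (i + 1) 1)
                     + pvScanBreak a ai none (PySem.List.pyRange (i + 1) n 1)
      if tmp < 2 then cnt + 1 else cnt) 2

-- ===== PORT B =====
-- running-minimum accumulation: pref.append(min(pref[-1], x))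
def pvPrefMinsAux (m : Int) : List Int → List Int
  | [] => []
  | x :: xs => min m x :: pvPrefMinsAux (min m x) xs

def pvPrefList : List Int → List Int
  | [] => []
  | x :: xs => x :: pvPrefMinsAux x xs

def solution_alt (a : List Int) : Int :=
  let n : Int := a.length
  if n ≤ 2 then n
  else
    let pref := pvPrefList a
    let suf := (pvPrefList a.reverse).reverse
    (PySem.List.pyRange 1 (n - 1) 1).foldl (fun cnt i =>
      let ai := PySem.List.pyGetD a i 0
      if ai ≤ PySem.List.pyGetD pref (i - 1) 0 ∨ ai ≤ PySem.List.pyGetD suf (i + 1) 0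
      then cnt + 1 else cnt) 2

-- ===== PRECONDITION & SPEC =====
def Spec_solution (a : List Int) (out : Int) : Prop := out = solution_alt a
instance (a : List Int) (out : Int) : Decidable (Spec_solution a out) := by unfold Spec_solution; infer_instance

-- ===== CLAIM (what is proved, stated in full; the proofs are below) =====
def Claim_equal_solution : Prop := ∀ (a : List Int), Dom_solution a → Spec_solution a (solution a)

-- ===== LEMMAS AND PROOFS =====

theorem length_pvPrefMinsAux (m : Int) (xs : List Int) :
    (pvPrefMinsAux m xs).length = xs.length := by
  induction xs generalizing m with
  | nil => simp [pvPrefMinsAux]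
  | cons x xs ih => simp [pvPrefMinsAux, ih]

theorem length_pvPrefList (xs : List Int) : (pvPrefList xs).length = xs.length := by
  cases xs with
  | nil => simp [pvPrefList]
  | cons x xs => simp [pvPrefList, length_pvPrefMinsAux]

theorem prefAux_le (c : Int) :
    ∀ (xs : List Int) (m : Int) (k : Nat) (h : k < xs.length),
      (c ≤ (pvPrefMinsAux m xs)[k]'(by rw [length_pvPrefMinsAux]; exact h)
        ↔ c ≤ m ∧ ∀ j : Nat, (hj : j ≤ k) → c ≤ xs[j]'(by omega)) := by
  intro xs
  induction xs with
  | nil => intro m k h; simp at h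
  | cons x xs ih =>
    intro m k h
    cases k with
    | zero =>
      simp only [pvPrefMinsAux, List.getElem_cons_zero, le_min_iff]
      constructor
      · rintro ⟨h1, h2⟩
        refine ⟨h1, fun j hj => ?_⟩
        have hj0 : j = 0 := Nat.le_zero.mp hj
        subst hj0
        simpa using h2
      · rintro ⟨h1, h2⟩
        exact ⟨h1, by simpa using h2 0 (Nat.le_refl 0)⟩
    | succ k =>
      have hk : k < xs.length := by simpa using h
      have := ih (min m x) k hk
      simp only [pvPrefMinsAux, List.getElem_cons_succ]
      rw [this]
      constructor
      · rintro ⟨h1, h2⟩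
        rw [le_min_iff] at h1
        refine ⟨h1.1, fun j hj => ?_⟩
        cases j with
        | zero => simpa using h1.2
        | succ j => simpa using h2 j (by omega)
      · rintro ⟨h1, h2⟩
        refine ⟨le_min_iff.mpr ⟨h1, by simpa using h2 0 (by omega)⟩, fun j hj => ?_⟩
        simpa using h2 (j + 1) (by omega)

theorem prefList_le (c : Int) (a : List Int) (k : Nat) (h : k < a.length) :
    (c ≤ (pvPrefList a)[k]'(by rw [length_pvPrefList]; exact h)
      ↔ ∀ j : Nat, (hj : j ≤ k) → c ≤ a[j]'(by omega)) := by
  cases a with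
  | nil => simp at h
  | cons x xs =>
    cases k with
    | zero =>
      simp only [pvPrefList, List.getElem_cons_zero]
      constructor
      · intro h1 j hj
        have hj0 : j = 0 := Nat.le_zero.mp hj
        subst hj0
        simpa using h1
      · intro h1
        simpa using h1 0 (Nat.le_refl 0)
    | succ k =>
      have hk : k < xs.length := by simpa using h
      simp only [pvPrefList, List.getElem_cons_succ]
      rw [prefAux_le c xs x k hk]
      constructor
      · rintro ⟨h1, h2⟩ j hj
        cases j with
        | zero => simpa using h1
        | succ j => simpa using h2 j (by omega)
      · intro h1
        exact ⟨by simpa using h1 0 (by omega), fun j hj => by simpa using h1 (j + 1) (by omega)⟩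

theorem sufList_le (c : Int) (a : List Int) (k : Nat) (h : k < a.length) :
    (c ≤ ((pvPrefList a.reverse).reverse)[k]'(by
        rw [List.length_reverse, length_pvPrefList, List.length_reverse]; exact h)
      ↔ ∀ j : Nat, k ≤ j → (hj : j < a.length) → c ≤ a[j]'(hj)) := by
  rw [List.getElem_reverse]
  have hidx : (pvPrefList a.reverse).length - 1 - k < a.reverse.length := by
    simp [length_pvPrefList]; omega
  rw [prefList_le c a.reverse _ hidx]
  simp only [length_pvPrefList, List.length_reverse]
  constructor
  · intro h1 j hkj hj
    have h2 := h1 (a.length - 1 - j) (by omega)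
    rw [List.getElem_reverse] at h2
    convert h2 using 2
    omega
  · intro h1 j hj
    rw [List.getElem_reverse]
    exact h1 (a.length - 1 - j) (by omega) (by omega)

theorem scanBreak_eq (a : List Int) (ai : Int) :
    ∀ l : List Int, pvScanBreak a ai none l
      = if l.any (fun j => decide (PySem.List.pyGetD a j 0 < ai)) then 1 else 0 := by
  intro l
  induction l with
  | nil => simp [pvScanBreak]
  | cons j js ih =>
    simp only [pvScanBreak, List.any_cons]
    by_cases hj : PySem.List.pyGetD a j 0 < ai
    · simp [hj]
    · simp [hj, ih]

-- ===== VERDICT (by name: the statement is the Claim_ definition above) =====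
theorem solution_spec : Claim_equal_solution := by
  intro a _
  unfold Spec_solution solution solution_alt
  simp only []
  by_cases hn : (a.length : Int) ≤ 2
  · simp [hn]
  · simp only [hn, if_false]
    apply PySem.List.foldl_congr_mem
    intro cnt i hi
    rw [PySem.List.mem_pyRange_one] at hi
    obtain ⟨hi1, hi2⟩ := hi
    have hlen : 2 < (a.length : Int) := by omega
    set n : Int := (a.length : Int) with hn'
    have hiN : i.toNat < a.length := by omega
    have hai : PySem.List.pyGetD a i 0 = a[i.toNat] := by
      rw [PySem.List.pyGetD_eq_getElem (i := i) a 0 (by omega) (by omega)]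
    set ai := PySem.List.pyGetD a i 0 with hai'
    -- characterize the left scan
    rw [scanBreak_eq, scanBreak_eq]
    have hex : ∀ (lo hi : Int), ((PySem.List.pyRange lo hi 1).any
          (fun j => decide (PySem.List.pyGetD a j 0 < ai)) = true)
        ↔ ∃ j : Int, lo ≤ j ∧ j < hi ∧ PySem.List.pyGetD a j 0 < ai := by
      intro lo hi
      rw [List.any_eq_true]
      constructor
      · rintro ⟨j, hj, hp⟩
        rw [PySem.List.mem_pyRange_one] at hj
        exact ⟨j, hj.1, hj.2, by simpa using hp⟩
      · rintro ⟨j, h1, h2, h3⟩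
        exact ⟨j, PySem.List.mem_pyRange_one.mpr ⟨h1, h2⟩, by simpa using h3⟩
    -- left side: no smaller element at index ≤ i  ↔  ai ≤ pref[i-1]
    have hprefseg : ((i : Int) - 1).toNat < a.length := by omega
    have hleft : (¬ ∃ j : Int, 0 ≤ j ∧ j < i + 1 ∧ PySem.List.pyGetD a j 0 < ai)
        ↔ ai ≤ PySem.List.pyGetD (pvPrefList a) (i - 1) 0 := by
      rw [PySem.List.pyGetD_eq_getElem (i := i - 1) (pvPrefList a) 0 (by omega)
        (by rw [length_pvPrefList]; omega)]
      rw [prefList_le ai a (i - 1).toNat hprefseg]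
      constructor
      · intro hno j hjk
        by_contra hc
        push_neg at hc
        refine hno ⟨(j : Int), Int.natCast_nonneg j, by omega, ?_⟩
        rw [PySem.List.pyGetD_eq_getElem (i := (j : Int)) a 0 (Int.natCast_nonneg j) (by omega)]
        simpa using hc
      · rintro hall ⟨j, hj0, hji, hjlt⟩
        rw [PySem.List.pyGetD_eq_getElem (i := j) a 0 hj0 (by omega)] at hjlt
        by_cases hji' : j = i
        · subst hji'; rw [hai] at hjlt; omega
        · have h3 : ai ≤ a[j.toNat] := hall j.toNat (by omega)
          omega
    -- right side: no smaller element at index > i  ↔  ai ≤ suf[i+1]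
    have hsufseg : ((i : Int) + 1).toNat < a.length := by omega
    have hright : (¬ ∃ j : Int, i + 1 ≤ j ∧ j < n ∧ PySem.List.pyGetD a j 0 < ai)
        ↔ ai ≤ PySem.List.pyGetD ((pvPrefList a.reverse).reverse) (i + 1) 0 := by
      rw [PySem.List.pyGetD_eq_getElem (i := i + 1) ((pvPrefList a.reverse).reverse) 0 (by omega)
        (by rw [List.length_reverse, length_pvPrefList, List.length_reverse]; omega)]
      rw [sufList_le ai a (i + 1).toNat hsufseg]
      constructor
      · intro hno j hjk hj
        by_contra hc
        push_neg at hc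
        refine hno ⟨(j : Int), by omega, by omega, ?_⟩
        rw [PySem.List.pyGetD_eq_getElem (i := (j : Int)) a 0 (Int.natCast_nonneg j) (by omega)]
        simpa using hc
      · rintro hall ⟨j, hj1, hjn, hjlt⟩
        rw [PySem.List.pyGetD_eq_getElem (i := j) a 0 (by omega) (by omega)] at hjlt
        have h3 : ai ≤ a[j.toNat] := hall j.toNat (by omega) (by omega)
        omega
    have hLiff : (((PySem.List.pyRange 0 (i + 1) 1).any
          fun j => decide (PySem.List.pyGetD a j 0 < ai)) = true)
        ↔ ¬ ai ≤ PySem.List.pyGetD (pvPrefList a) (i - 1) 0 := by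
      rw [hex 0 (i + 1), ← hleft, not_not]
    have hRiff : (((PySem.List.pyRange (i + 1) n 1).any
          fun j => decide (PySem.List.pyGetD a j 0 < ai)) = true)
        ↔ ¬ ai ≤ PySem.List.pyGetD ((pvPrefList a.reverse).reverse) (i + 1) 0 := by
      rw [hex (i + 1) n, ← hright, not_not]
    by_cases hA : ai ≤ PySem.List.pyGetD (pvPrefList a) (i - 1) 0 <;>
      by_cases hB : ai ≤ PySem.List.pyGetD ((pvPrefList a.reverse).reverse) (i + 1) 0 <;>
      simp [hLiff, hRiff, hA, hB]
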